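-- pv_equiv track=rewrite | github.com/TheKinng96/python-rakuten-csv-to-shopify-csv | manual/app/grouper.py | group_by_catalog
-- ===== SOURCE A (Python) =====
-- def group_by_catalog(sku_list, id_list):
--     """
--     Group SKUs by their Catalog ID and find common segment-prefix.
--
--     Args:
--         sku_list (list): List of SKU strings
--         id_list (list): List of Catalog ID strings
--
--     Returns:
--         list: List of tuples (catalog_id, handler, sku)
--     """
--     # Build mapping of catalog_id -> list of skus
--     catalog_map = {}
--     for sku, id in zip(sku_list, id_list):
--         if not id or not sku:
--             continue
--
--         if id not in catalog_map:
--             catalog_map[id] = []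
--         catalog_map[id].append(sku)
--
--     # Process each catalog group
--     result = []
--     for catalog_id, skus in catalog_map.items():
--         if len(skus) == 1:
--             # Single SKU case
--             handler = skus[0]
--             result.append((catalog_id, handler, skus[0]))
--         else:
--             # Multiple SKUs: find common prefix
--             prefix = find_common_prefix(skus)
--             if not prefix:
--                 # No common prefix: use shortest SKU
--                 prefix = min(skus, key=len)
--
--             # Add all SKUs under this handler
--             for sku in skus:
--                 result.append((catalog_id, prefix, sku))
--
--     return result
--
-- def find_common_prefix(skus):
--     """
--     Find the longest common prefix among a list of SKUs.
--
--     Args: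
--         skus (list): List of SKU strings
--
--     Returns:
--         str: Longest common prefix or empty string if none found
--     """
--     if not skus:
--         return ""
--
--     # Split SKUs into segments
--     segments = [sku.split('-') for sku in skus]
--
--     # Find common segments
--     common = []
--     for i in range(min(len(s) for s in segments)):
--         # Get ith segment from each SKU
--         current_segments = [s[i] for s in segments]
--
--         # Check if all segments are the same
--         if len(set(current_segments)) == 1:
--             common.append(current_segments[0])
--         else:
--             break
--
--     return '-'.join(common) if common else ""
-- ===== SOURCE B (Python) =====
-- def group_by_catalog(sku_list, id_list):
--     """Group SKUs by Catalog ID and find the common segment-prefix per group."""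
--     # Keep only valid (catalog_id, sku) pairs, in input order.
--     pairs = [(i, s) for s, i in zip(sku_list, id_list) if i and s]
--     # Distinct catalog ids in first-occurrence order (no explicit dict of lists).
--     ids = list(dict.fromkeys(i for i, _ in pairs))
--     result = []
--     for cid in ids:
--         skus = [s for i, s in pairs if i == cid]
--         if len(skus) == 1:
--             result.append((cid, skus[0], skus[0]))
--         else:
--             prefix = _segment_prefix(skus)
--             if not prefix:
--                 prefix = min(skus, key=len)
--             result.extend((cid, prefix, s) for s in skus)
--     return result
--
--
-- def _lcp2(xs, ys):
--     """Longest common prefix of two segment lists."""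
--     out = []
--     for a, b in zip(xs, ys):
--         if a != b:
--             break
--         out.append(a)
--     return out
--
--
-- def _segment_prefix(skus):
--     """Common '-'-segment prefix of all SKUs via a pairwise fold."""
--     if not skus:
--         return ""
--     segs = skus[0].split('-')
--     for sku in skus[1:]:
--         segs = _lcp2(segs, sku.split('-'))
--     return '-'.join(segs)
-- ===== Notes on version B (the rewrite author's own statement) =====
-- stated objective: alternative
-- what changed: B drops A's dict-of-lists accumulator (grouping instead by deduplicating the catalog ids and filtering the valid pairs per id) and replaces A's column-by-column segment scan with its per-column set test by a pairwise fold of two-list common prefixes.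
import Mathlib
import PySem

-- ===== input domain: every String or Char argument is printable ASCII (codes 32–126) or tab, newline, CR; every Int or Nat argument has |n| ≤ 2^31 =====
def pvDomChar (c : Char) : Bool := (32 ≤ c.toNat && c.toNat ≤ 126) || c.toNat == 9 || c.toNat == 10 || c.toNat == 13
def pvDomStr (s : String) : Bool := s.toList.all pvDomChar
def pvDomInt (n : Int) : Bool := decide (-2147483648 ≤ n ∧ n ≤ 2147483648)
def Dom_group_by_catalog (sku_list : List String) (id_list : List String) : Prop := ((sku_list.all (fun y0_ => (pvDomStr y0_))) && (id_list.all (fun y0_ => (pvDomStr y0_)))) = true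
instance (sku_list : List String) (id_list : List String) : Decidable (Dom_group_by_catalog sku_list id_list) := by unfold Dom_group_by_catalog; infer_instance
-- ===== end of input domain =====

-- B replaces A's dict-of-lists grouping by a dedup-of-ids scan with per-id filtering, and A's
-- column-by-column common-segment scan (set test per column) by a pairwise fold of two-list
-- common prefixes; objective: alternative (same results, genuinely different traversal).

-- ===== PORT A =====

-- the loop 'for i in range(min_len): ... else: break' of find_common_prefix; fuel = remaining iterations
def pvColLoop (segments : List (List String)) : Nat → Nat → List String
  | 0, _ => []
  | fuel+1, i =>
    -- s[i]: exact, the caller guarantees i < length of every segment list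
    let cur := segments.map (fun s => PySem.List.pyGetD s (i : Int) "")
    if PySem.Set.len (PySem.Set.ofList cur) == 1 then
      cur.headD "" :: pvColLoop segments fuel (i+1)
    else []

def findCommonPrefix (skus : List String) : String :=
  if skus = [] then ""
  else
    let segments := skus.map (fun sku => (PySem.Str.split? sku "-").getD [])  -- sep "-" ≠ "": split? is some
    -- min(len(s) for s in segments): segments nonempty, min? is some
    let m := (PySem.List.min? (segments.map (·.length)) (fun x => x)).getD 0
    let common := pvColLoop segments m 0
    if common ≠ [] then PySem.Str.join "-" common else ""

def group_by_catalog (sku_list : List String) (id_list : List String) : List (String × String × String) :=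
  let catalog_map := (sku_list.zip id_list).foldl (fun d p =>
    if p.2 == "" || p.1 == "" then d  -- 'if not id or not sku: continue'
    else
      let d1 := if d.contains p.2 then d else d.insert p.2 ([] : List String)
      d1.insert p.2 (d1.getD p.2 [] ++ [p.1]))  -- catalog_map[id].append(sku), in-place
    PySem.Dict.empty
  catalog_map.items.foldl (fun res g =>
    if g.2.length == 1 then
      res ++ [(g.1, g.2.headD "", g.2.headD "")]  -- skus[0]: skus has length 1 here
    else
      let pre := findCommonPrefix g.2
      let pre2 := if pre == "" then (PySem.List.min? g.2 PySem.Str.len).getD "" else pre  -- min(skus, key=len), skus nonempty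
      res ++ g.2.map (fun s => (g.1, pre2, s))) []

-- ===== PORT B =====

-- _lcp2: walk two segment lists in parallel until the first mismatch
def pvLcp2 : List String → List String → List String
  | a :: xs, b :: ys => if a == b then a :: pvLcp2 xs ys else []
  | _, _ => []

def segmentPrefix (skus : List String) : String :=
  match skus with
  | [] => ""
  | s :: rest =>
    PySem.Str.join "-"
      (rest.foldl (fun segs sku => pvLcp2 segs ((PySem.Str.split? sku "-").getD []))
        ((PySem.Str.split? s "-").getD []))

def group_by_catalog_alt (sku_list : List String) (id_list : List String) : List (String × String × String) :=
  let pairs := ((sku_list.zip id_list).filter (fun p => p.2 != "" && p.1 != "")).map (fun p => (p.2, p.1))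
  let ids := PySem.List.dedup (pairs.map (·.1))
  ids.foldl (fun res cid =>
    let skus := (pairs.filter (fun p => p.1 == cid)).map (·.2)
    if skus.length == 1 then
      res ++ [(cid, skus.headD "", skus.headD "")]
    else
      let pre := segmentPrefix skus
      let pre2 := if pre == "" then (PySem.List.min? skus PySem.Str.len).getD "" else pre
      res ++ skus.map (fun s => (cid, pre2, s))) []

-- ===== PRECONDITION & SPEC =====
def Spec_group_by_catalog (sku_list : List String) (id_list : List String) (out : List (String × String × String)) : Prop := out = group_by_catalog_alt sku_list id_list
instance (sku_list : List String) (id_list : List String) (out : List (String × String × String)) : Decidable (Spec_group_by_catalog sku_list id_list out) := by unfold Spec_group_by_catalog; infer_instance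

-- ===== CLAIM (what is proved, stated in full; the proofs are below) =====
def Claim_equal_group_by_catalog : Prop := ∀ (sku_list : List String) (id_list : List String), Dom_group_by_catalog sku_list id_list → Spec_group_by_catalog sku_list id_list (group_by_catalog sku_list id_list)

-- ===== LEMMAS AND PROOFS =====

-- column-wise common prefix: reference shape both prefix computations are reduced to
def pvLcpAll : List String → List (List String) → List String
  | [], _ => []
  | a :: t, rest =>
    if rest.all (fun l => l.head? == some a) then a :: pvLcpAll t (rest.map List.tail) else []

theorem pvLcpAll_nil (acc : List String) : pvLcpAll acc [] = acc := by
  induction acc with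
  | nil => rfl
  | cons a t ih => simp [pvLcpAll, ih]

theorem pvLcpAll_cons (acc r rest) : pvLcpAll acc (r :: rest) = pvLcpAll (pvLcp2 acc r) rest := by
  induction acc generalizing r rest with
  | nil => simp [pvLcpAll, pvLcp2]
  | cons a t ih =>
    cases r with
    | nil =>
      simp [pvLcpAll, pvLcp2]
    | cons b rt =>
      by_cases hab : a = b
      · subst hab
        simp only [pvLcp2, beq_self_eq_true, if_true, pvLcpAll, List.all_cons, List.head?,
          Bool.true_and, List.map_cons, List.tail_cons]
        split_ifs with hrest
        · rw [ih]
        · rfl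
      · simp [pvLcpAll, pvLcp2, hab, Ne.symm hab]

theorem pv_foldl_lcp2 (rest : List (List String)) (acc : List String) :
    rest.foldl pvLcp2 acc = pvLcpAll acc rest := by
  induction rest generalizing acc with
  | nil => simp [pvLcpAll_nil]
  | cons r rest ih => simp [List.foldl_cons, ih, pvLcpAll_cons]

theorem pv_getD_not_contains (d : PySem.Dict String (List String)) (k : String)
    (h : d.contains k = false) : d.getD k [] = [] := by
  simp [PySem.Dict.getD, PySem.Dict.get?, PySem.Dict.contains] at *
  rw [List.find?_eq_none.mpr]
  · rfl
  · intro p hp; simpa using h p.1 p.2 hp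

theorem pv_nodup_all_eq {a : String} : ∀ (s : List String), s.Nodup → a ∈ s → (∀ y ∈ s, y = a) → s = [a]
  | [], _, ha, _ => absurd ha (by simp)
  | b :: t, hnd, _, hall => by
    have hb : b = a := hall b (by simp)
    subst hb
    cases t with
    | nil => rfl
    | cons c u =>
      have hc : c = b := hall c (by simp)
      subst hc
      exact absurd hnd (by simp)

theorem pv_set_len_one (a : String) (l : List String) :
    ((PySem.Set.len (PySem.Set.ofList (a :: l)) == 1) = true) ↔ ∀ x ∈ l, x = a := by
  have hnd := PySem.Set.nodup_ofList (a :: l)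
  have hmem : ∀ y, y ∈ PySem.Set.ofList (a :: l) ↔ y ∈ a :: l := fun y => PySem.Set.mem_ofList _ _
  set s := PySem.Set.ofList (a :: l) with hs
  have ha : a ∈ s := (hmem a).mpr (List.mem_cons_self ..)
  constructor
  · intro h
    have hlen : s.length = 1 := by
      simp [PySem.Set.len] at h; exact_mod_cast h
    obtain ⟨x, hx⟩ := List.length_eq_one_iff.mp hlen
    have hxa : x = a := by rw [hx] at ha; exact List.eq_of_mem_singleton ha |>.symm
    intro y hy
    have : y ∈ s := (hmem y).mpr (List.mem_cons_of_mem _ hy)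
    rw [hx, hxa] at this; simpa using this
  · intro h
    have hall : ∀ y ∈ s, y = a := by
      intro y hy
      rcases List.mem_cons.mp ((hmem y).mp hy) with h1 | h2
      · exact h1
      · exact h y h2
    have := pv_nodup_all_eq s hnd ha hall
    simp [PySem.Set.len, this]

theorem pv_colLoop_eq : ∀ (fuel i : Nat) (s0 : List String) (rest : List (List String)),
    (∀ l ∈ s0 :: rest, fuel + i ≤ l.length) →
    (∃ l ∈ s0 :: rest, l.length = fuel + i) →
    pvColLoop (s0 :: rest) fuel i = pvLcpAll (s0.drop i) (rest.map (List.drop i)) := by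
  intro fuel
  induction fuel with
  | zero =>
    intro i s0 rest hmin hex
    rcases hex with ⟨l, hl, hlen⟩
    rcases List.mem_cons.mp hl with h0 | hlr
    · have : List.drop i s0 = [] := List.drop_eq_nil_iff.mpr (by rw [← h0]; omega)
      simp [pvColLoop, this, pvLcpAll]
    · cases hd : List.drop i s0 with
      | nil => simp [pvColLoop, pvLcpAll]
      | cons a t =>
        have hldrop : l.drop i = [] := List.drop_eq_nil_iff.mpr (by omega)
        have hcond : (rest.map (List.drop i)).all (fun l => l.head? == some a) = false := by
          refine List.all_eq_false.mpr ⟨l.drop i, List.mem_map_of_mem hlr, ?_⟩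
          simp [hldrop]
        simp [pvColLoop, pvLcpAll, hcond]
  | succ fuel ih =>
    intro i s0 rest hmin hex
    have hi0 : i < s0.length := by have := hmin s0 (List.mem_cons_self ..); omega
    have hir : ∀ l ∈ rest, i < l.length := by
      intro l hl; have := hmin l (List.mem_cons_of_mem _ hl); omega
    have hcur : (s0 :: rest).map (fun s => PySem.List.pyGetD s (i : Int) "") =
        s0[i] :: rest.map (fun l => l[i]?.getD "") := by
      simp [PySem.List.pyGetD_natCast, List.getElem?_eq_getElem hi0]
    have hcond : ((PySem.Set.len (PySem.Set.ofList (s0[i] :: rest.map (fun l => l[i]?.getD ""))) == 1) = true)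
        ↔ ((rest.map (List.drop i)).all (fun l => l.head? == some s0[i]) = true) := by
      rw [pv_set_len_one]
      simp only [List.all_map, List.all_eq_true, List.forall_mem_map]
      constructor
      · intro h l hl
        have := h l hl
        rw [List.getElem?_eq_getElem (hir l hl)] at this
        simp only [Option.getD_some] at this
        simp [List.head?_drop, List.getElem?_eq_getElem (hir l hl), this]
      · intro h l hl
        have := h l hl
        simp only [Function.comp, List.head?_drop, beq_iff_eq] at this
        rw [this]
        rfl
    rw [List.drop_eq_getElem_cons hi0]
    show pvColLoop (s0 :: rest) (fuel+1) i = _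
    simp only [pvColLoop, hcur, pvLcpAll]
    by_cases hc : (rest.map (List.drop i)).all (fun l => l.head? == some s0[i]) = true
    · rw [if_pos (hcond.mpr hc), if_pos hc]
      have hmaps : (rest.map (List.drop i)).map List.tail = rest.map (List.drop (i+1)) := by
        rw [List.map_map]; exact List.map_congr_left (fun l _ => List.tail_drop)
      rw [hmaps]
      have := ih (i+1) s0 rest (by intro l hl; have := hmin l hl; omega)
        (by rcases hex with ⟨l, hl, hlen⟩; exact ⟨l, hl, by omega⟩)
      simp [this]
    · rw [if_neg (by rw [hcond]; exact hc), if_neg hc]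

theorem pv_join_if (c : List String) :
    (if c ≠ [] then PySem.Str.join "-" c else "") = PySem.Str.join "-" c := by
  cases c with
  | nil => rfl
  | cons a t => simp

theorem pv_prefix_eq (skus : List String) : findCommonPrefix skus = segmentPrefix skus := by
  cases skus with
  | nil => rfl
  | cons s rest =>
    simp only [findCommonPrefix, segmentPrefix, if_neg (List.cons_ne_nil s rest)]
    rw [List.foldl_map (f := fun sku => (PySem.Str.split? sku "-").getD [])
      (g := pvLcp2) |>.symm]
    rw [pv_foldl_lcp2]
    set sp := fun sku => (PySem.Str.split? sku "-").getD [] with hsp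
    set segs := (s :: rest).map sp with hsegs
    cases hm : PySem.List.min? (segs.map (·.length)) (fun x => x) with
    | none =>
      rw [PySem.List.min?_eq_none_iff] at hm
      exact absurd hm (by simp [hsegs])
    | some m =>
      have hmin : ∀ l ∈ segs, m + 0 ≤ l.length := by
        intro l hl
        have := PySem.List.min?_isMin hm l.length (List.mem_map_of_mem hl)
        omega
      have hex : ∃ l ∈ segs, l.length = m + 0 := by
        rcases List.mem_map.mp (PySem.List.min?_mem hm) with ⟨l, hl, hlen⟩
        exact ⟨l, hl, by omega⟩
      rw [hsegs] at hmin hex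
      simp only [List.map_cons] at hmin hex
      simp only [hsegs, List.map_cons, Option.getD_some]
      rw [pv_colLoop_eq m 0 (sp s) (rest.map sp) hmin hex]
      have hdrop : (rest.map sp).map (List.drop 0) = rest.map sp := by simp
      rw [List.drop_zero, hdrop]
      rw [pv_join_if]

theorem pv_insert_absent_modify (d : PySem.Dict String (List String)) (k sku : String) :
    ((if d.contains k then d else d.insert k []).insert k
      ((if d.contains k then d else d.insert k []).getD k [] ++ [sku]))
    = d.modify k [] (fun l => l ++ [sku]) := by
  by_cases h : d.contains k
  · simp [h, PySem.Dict.modify]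
  · simp only [h, Bool.false_eq_true, if_false, PySem.Dict.modify]
    rw [PySem.Dict.getD_insert, pv_getD_not_contains d k (by simpa using h)]
    simp [PySem.Dict.insert_insert_self]

theorem pv_main (sku_list id_list : List String) :
    group_by_catalog sku_list id_list = group_by_catalog_alt sku_list id_list := by
  simp only [group_by_catalog, group_by_catalog_alt]
  set pairs := ((sku_list.zip id_list).filter (fun p => p.2 != "" && p.1 != "")).map
    (fun p => (p.2, p.1)) with hpairs
  -- A's dict-building loop is the canonical modify-fold over the filtered, swapped pairs
  have hdict : (sku_list.zip id_list).foldl (fun d p =>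
      if p.2 == "" || p.1 == "" then d
      else
        let d1 := if d.contains p.2 then d else d.insert p.2 ([] : List String)
        d1.insert p.2 (d1.getD p.2 [] ++ [p.1])) PySem.Dict.empty
      = pairs.foldl (fun d p => d.modify p.1 [] (fun l => l ++ [p.2])) PySem.Dict.empty := by
    rw [hpairs, List.foldl_map, List.foldl_filter]
    congr 1
    funext d p
    by_cases h2 : p.2 = "" <;> by_cases h1 : p.1 = "" <;>
      simp [h1, h2, pv_insert_absent_modify]
  rw [hdict]
  set d := pairs.foldl (fun d p => d.modify p.1 [] (fun l => l ++ [p.2])) PySem.Dict.empty with hd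
  have hkeys : d.keys = PySem.Set.ofList (pairs.map (·.1)) := by
    rw [hd, PySem.Dict.keys_foldl_modify_key pairs (fun p => p.1) [] (fun _ x => (fun l => l ++ [x.2]))]
    rfl
  have hnd : d.keys.Nodup := by
    rw [hkeys]; exact PySem.Set.nodup_ofList _
  have hgetD : ∀ k, d.getD k [] = (pairs.filter (fun p => p.1 == k)).map (·.2) := by
    intro k
    rw [hd, PySem.Dict.getD_foldl_modify_append]
    rfl
  have hitems : d.items = (PySem.Set.ofList (pairs.map (·.1))).map
      (fun k => (k, (pairs.filter (fun p => p.1 == k)).map (·.2))) := by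
    rw [PySem.Dict.items_eq_map_keys d hnd [], hkeys]
    exact List.map_congr_left (fun k _ => by rw [hgetD])
  rw [hitems, List.foldl_map, PySem.List.dedup_eq_ofList]
  apply PySem.List.foldl_congr_mem
  intro res k _
  simp only [pv_prefix_eq]

-- ===== VERDICT (by name: the statement is the Claim_ definition above) =====
theorem group_by_catalog_spec : Claim_equal_group_by_catalog := by
  intro sku_list id_list _
  unfold Spec_group_by_catalog
  exact pv_main sku_list id_list
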